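-- pv_equiv track=rewrite | github.com/JSebastianIEU/Craig-Pricing | extractor.py | match_cover_type
-- ===== SOURCE A (Python) =====
-- from typing import Optional
--
-- COVER_TYPE_ALIASES = {
--     "self_cover": ["self cover", "self-cover", "same cover", "no separate cover"],
--     "card_cover": ["card cover", "card-cover", "thick cover", "heavy cover", "300gsm cover"],
--     "card_cover_lam": [
--         "card cover lam", "card cover laminated", "laminated cover",
--         "lam cover", "cover with lam", "card cover + lam",
--         "matt lam cover", "gloss lam cover", "laminated",
--     ],
-- }
--
-- def match_cover_type(text: str) -> Optional[str]:
--     """Match cover type from text."""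
--     text_lower = text.lower()
--     # Check longest aliases first to avoid partial matches
--     sorted_items = []
--     for key, aliases in COVER_TYPE_ALIASES.items():
--         for alias in aliases:
--             sorted_items.append((alias, key))
--     sorted_items.sort(key=lambda x: -len(x[0]))
--
--     for alias, key in sorted_items:
--         if alias in text_lower:
--             return key
--     return None
-- ===== SOURCE B (Python) =====
-- from typing import Optional
--
-- COVER_TYPE_ALIASES = {
--     "self_cover": ["self cover", "self-cover", "same cover", "no separate cover"],
--     "card_cover": ["card cover", "card-cover", "thick cover", "heavy cover", "300gsm cover"],
--     "card_cover_lam": [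
--         "card cover lam", "card cover laminated", "laminated cover",
--         "lam cover", "cover with lam", "card cover + lam",
--         "matt lam cover", "gloss lam cover", "laminated",
--     ],
-- }
--
-- def match_cover_type(text: str) -> Optional[str]:
--     """Match cover type from text."""
--     text_lower = text.lower()
--     best_key = None
--     best_len = -1
--     for key, aliases in COVER_TYPE_ALIASES.items():
--         for alias in aliases:
--             if alias in text_lower and len(alias) > best_len:
--                 best_key = key
--                 best_len = len(alias)
--     return best_key
-- ===== Notes on version B (the rewrite author's own statement) =====
-- stated objective: simpler
-- what changed: Replaces building and sorting the flattened alias list followed by a first-match scan with a single pass over the alias table that keeps the longest matching alias seen so far (strict > preserves the stable sort's earliest-insertion tie-break).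
import Mathlib
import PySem

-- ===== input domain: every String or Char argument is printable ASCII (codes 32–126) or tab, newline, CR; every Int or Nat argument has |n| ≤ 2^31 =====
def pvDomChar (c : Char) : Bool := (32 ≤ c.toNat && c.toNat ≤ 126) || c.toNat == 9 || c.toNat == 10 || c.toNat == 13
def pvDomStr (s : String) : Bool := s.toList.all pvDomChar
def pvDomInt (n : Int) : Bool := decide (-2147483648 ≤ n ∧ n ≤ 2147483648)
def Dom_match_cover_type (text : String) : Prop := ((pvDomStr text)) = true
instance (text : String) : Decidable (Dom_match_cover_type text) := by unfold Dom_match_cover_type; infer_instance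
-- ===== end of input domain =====

-- B replaces flatten+stable-sort+first-match by a single pass keeping the longest matching al (simpler, same results).


-- the module constant COVER_TYPE_ALIASES (dict → association list in insertion order)
def pvCoverTypeAliases : List (String × List String) :=
  [("self_cover", ["self cover", "self-cover", "same cover", "no separate cover"]),
   ("card_cover", ["card cover", "card-cover", "thick cover", "heavy cover", "300gsm cover"]),
   ("card_cover_lam",
     ["card cover lam", "card cover laminated", "laminated cover",
      "lam cover", "cover with lam", "card cover + lam",
      "matt lam cover", "gloss lam cover", "laminated"])]

-- ===== PORT A =====
-- the final 'for al, key in sorted_items: if al in text_lower: return key' loop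
def pvFirstMatch (items : List (String × String)) (textLower : String) : Option String :=
  match items with
  | [] => none
  | (al, key) :: rest =>
      if PySem.Str.isIn al textLower then some key else pvFirstMatch rest textLower

def match_cover_type (text : String) : Option String :=
  let textLower := PySem.Str.lower text
  -- sorted_items built by the two nested append loops, then .sort(key=lambda x: -len(x[0])) (stable)
  let sortedItems0 :=
    pvCoverTypeAliases.foldl
      (fun acc kv => kv.2.foldl (fun acc al => acc ++ [(al, kv.1)]) acc) []
  let sortedItems := PySem.List.sorted sortedItems0 (fun x => -(PySem.Str.len x.1))
  pvFirstMatch sortedItems textLower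

-- ===== PORT B =====
def match_cover_type_alt (text : String) : Option String :=
  let textLower := PySem.Str.lower text
  -- one pass: keep (best_key, best_len), strict > so the earliest longest al wins
  let best :=
    pvCoverTypeAliases.foldl
      (fun acc kv =>
        kv.2.foldl
          (fun acc al =>
            if PySem.Str.isIn al textLower && decide (acc.2 < PySem.Str.len al) then
              (some kv.1, PySem.Str.len al)
            else acc)
          acc)
      ((none : Option String), (-1 : Int))
  best.1

-- ===== PRECONDITION & SPEC =====
def Spec_match_cover_type (text : String) (out : Option String) : Prop := out = match_cover_type_alt text
instance (text : String) (out : Option String) : Decidable (Spec_match_cover_type text out) := by unfold Spec_match_cover_type; infer_instance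

-- ===== CLAIM (what is proved, stated in full; the proofs are below) =====
def Claim_equal_match_cover_type : Prop := ∀ (text : String), Dom_match_cover_type text → Spec_match_cover_type text (match_cover_type text)

-- ===== LEMMAS AND PROOFS =====

-- inserting a non-matching element does not change the first match
theorem pvFind?_insertBy_neg {α : Type} (p : α → Bool) (before : α → α → Bool) (x : α)
    (hx : p x = false) (s : List α) :
    (PySem.List.insertBy before x s).find? p = s.find? p := by
  induction s with
  | nil => simp [PySem.List.insertBy, List.find?, hx]
  | cons z s' ih =>
      by_cases hb : before x z = true
      · simp [PySem.List.insertBy, hb, List.find?, hx]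
      · simp only [PySem.List.insertBy, hb, if_false, Bool.false_eq_true]
        cases hz : p z <;> simp [List.find?, hz, ih]

-- inserting a matching element into a key-sorted list: it wins iff it is strictly before the old first match
theorem pvFind?_insertBy_pos {α : Type} (p : α → Bool) (key : α → Int) (x : α)
    (hx : p x = true) (s : List α) (hs : s.Pairwise (fun a b => key a ≤ key b)) :
    (PySem.List.insertBy (fun a b => decide (key a < key b)) x s).find? p =
      match s.find? p with
      | none => some x
      | some y => if key x < key y then some x else some y := by
  induction s with
  | nil => simp [PySem.List.insertBy, List.find?, hx]
  | cons z s' ih =>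
      rw [List.pairwise_cons] at hs
      by_cases hb : key x < key z
      · -- x goes in front
        simp only [PySem.List.insertBy, hb, decide_true, if_true]
        cases hz : p z with
        | true => simp [List.find?, hx, hz, hb]
        | false =>
            simp only [List.find?, hx, hz]
            cases hf : s'.find? p with
            | none => simp
            | some y =>
                have hy : y ∈ s' := List.mem_of_find?_eq_some hf
                have : key x < key y := lt_of_lt_of_le hb (hs.1 y hy)
                simp [hf, this]
      · simp only [PySem.List.insertBy, hb, decide_false, if_false, Bool.false_eq_true]
        cases hz : p z with
        | true => simp [List.find?, hz, hb]
        | false => simp only [List.find?, hz, Bool.false_eq_true, if_false, ih hs.2]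

-- the single-pass longest-match fold equals first-match on the stably length-sorted list
theorem pvBest_eq_find_sorted {α β : Type} (p : α → Bool) (g : α → β) (w : α → Int)
    (hw : ∀ x, 0 ≤ w x) (l : List α) :
    l.foldl
        (fun acc x => if p x && decide (acc.2 < w x) then (some (g x), w x) else acc)
        ((none : Option β), (-1 : Int)) =
      match (PySem.List.sorted l (fun x => -(w x))).find? p with
      | none => ((none : Option β), (-1 : Int))
      | some y => (some (g y), w y) := by
  induction l using List.reverseRecOn with
  | nil => simp [PySem.List.sorted_eq_foldl_insertBy]
  | append_singleton l x ih =>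
      rw [List.foldl_append, ih]
      have hsort : PySem.List.sorted (l ++ [x]) (fun x => -(w x)) =
          PySem.List.insertBy (fun a b => decide (-(w a) < -(w b))) x
            (PySem.List.sorted l (fun x => -(w x))) := by
        rw [PySem.List.sorted_eq_foldl_insertBy, PySem.List.sorted_eq_foldl_insertBy,
          List.foldl_append, List.foldl_cons, List.foldl_nil]
      rw [hsort]
      cases hx : p x with
      | false =>
          rw [pvFind?_insertBy_neg p _ x hx]
          cases hf : (PySem.List.sorted l (fun x => -(w x))).find? p <;> simp [hx]
      | true =>
          have hpw : (PySem.List.sorted l (fun x => -(w x))).Pairwise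
              (fun a b => -(w a) ≤ -(w b)) := PySem.List.sorted_pairwise l (fun x => -(w x))
          rw [pvFind?_insertBy_pos p (fun a => -(w a)) x hx _ hpw]
          cases hf : (PySem.List.sorted l (fun x => -(w x))).find? p with
          | none =>
              have : (-1 : Int) < w x := lt_of_lt_of_le (by norm_num) (hw x)
              simp [hx, this]
          | some y =>
              by_cases hlt : w y < w x
              · have : -(w x) < -(w y) := by omega
                simp [hx, hlt, this]
              · have : ¬ (-(w x) < -(w y)) := by omega
                simp [hx, hlt, this]

-- A's final return loop is List.find? followed by the key projection
theorem pvFirstMatch_eq_find? (items : List (String × String)) (t : String) :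
    pvFirstMatch items t = (items.find? (fun x => PySem.Str.isIn x.1 t)).map Prod.snd := by
  induction items with
  | nil => simp [pvFirstMatch]
  | cons z rest ih =>
      obtain ⟨a, k⟩ := z
      cases h : PySem.Chars.isIn a.toList t.toList <;>
        simp [pvFirstMatch, List.find?, h, ih]

-- the flattened (alias, key) list, insertion order (proof-only abbreviation)
def pvFlat : List (String × String) :=
  [("self cover", "self_cover"), ("self-cover", "self_cover"), ("same cover", "self_cover"),
   ("no separate cover", "self_cover"),
   ("card cover", "card_cover"), ("card-cover", "card_cover"), ("thick cover", "card_cover"),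
   ("heavy cover", "card_cover"), ("300gsm cover", "card_cover"),
   ("card cover lam", "card_cover_lam"), ("card cover laminated", "card_cover_lam"),
   ("laminated cover", "card_cover_lam"), ("lam cover", "card_cover_lam"),
   ("cover with lam", "card_cover_lam"), ("card cover + lam", "card_cover_lam"),
   ("matt lam cover", "card_cover_lam"), ("gloss lam cover", "card_cover_lam"),
   ("laminated", "card_cover_lam")]

-- ===== VERDICT (by name: the statement is the Claim_ definition above) =====
set_option maxHeartbeats 2000000 in
theorem match_cover_type_spec : Claim_equal_match_cover_type := by
  intro text _
  show match_cover_type text = match_cover_type_alt text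
  have hA : match_cover_type text =
      pvFirstMatch (PySem.List.sorted pvFlat (fun x => -(PySem.Str.len x.1)))
        (PySem.Str.lower text) := rfl
  have hB : match_cover_type_alt text =
      (pvFlat.foldl
        (fun acc x =>
          if (fun x : String × String => PySem.Str.isIn x.1 (PySem.Str.lower text)) x &&
              decide (acc.2 < (fun x : String × String => PySem.Str.len x.1) x) then
            (some (Prod.snd x), (fun x : String × String => PySem.Str.len x.1) x)
          else acc)
        ((none : Option String), (-1 : Int))).1 := rfl
  rw [hA, hB, pvFirstMatch_eq_find?,
    pvBest_eq_find_sorted (fun x : String × String => PySem.Str.isIn x.1 (PySem.Str.lower text))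
      Prod.snd (fun x : String × String => PySem.Str.len x.1)
      (fun x => by simp [PySem.Str.len_eq]) pvFlat]
  cases hf : (PySem.List.sorted pvFlat (fun x => -(PySem.Str.len x.1))).find?
      (fun x : String × String => PySem.Str.isIn x.1 (PySem.Str.lower text)) <;>
    simp [hf]
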